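-- pv_equiv track=rewrite | github.com/aarizag/FunctionalProgramming | Amuse-Bouche/double_and_sum.py | doubleAndSum_3a
-- ===== SOURCE A (Python) =====
-- from typing import List, Tuple
--
-- def doubleAndSum_3a(xs: List[int]) -> int:
--     """
-- 	local variables: i (an index into xs), total.
-- 	"""
--     total = 0
--     enum_xs = list(enumerate(xs))
--     while enum_xs != []:
--         (i, x) = enum_xs[0]
--         total += (i%2+1)*x
--         enum_xs = enum_xs[1:]
--     return total
-- ===== SOURCE B (Python) =====
-- from typing import List, Tuple
--
-- def doubleAndSum_3a(xs: List[int]) -> int: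
--     # weight (i%2+1) = 1 + (i is odd): count every element once,
--     # then count the odd-indexed elements once more.
--     return sum(xs) + sum(xs[1::2])
-- ===== Notes on version B (the rewrite author's own statement) =====
-- stated objective: faster
-- what changed: Replaced the explicit while-loop that recopies the enumerate list each iteration (O(n^2)) by the identity (i%2+1) = 1 + (i odd): B returns sum(xs) + sum(xs[1::2]), two linear additive passes.
import Mathlib
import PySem

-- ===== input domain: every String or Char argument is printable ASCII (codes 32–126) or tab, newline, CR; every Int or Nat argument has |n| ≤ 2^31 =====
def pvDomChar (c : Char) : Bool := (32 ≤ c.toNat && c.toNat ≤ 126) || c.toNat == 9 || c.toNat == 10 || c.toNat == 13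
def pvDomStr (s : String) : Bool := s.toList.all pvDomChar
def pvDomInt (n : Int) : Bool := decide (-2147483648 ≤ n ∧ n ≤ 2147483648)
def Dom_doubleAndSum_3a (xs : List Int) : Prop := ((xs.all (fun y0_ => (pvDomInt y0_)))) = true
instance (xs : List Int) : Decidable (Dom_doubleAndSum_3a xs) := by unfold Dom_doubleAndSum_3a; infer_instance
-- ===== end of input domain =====

-- B replaces A's while-loop over an enumerate list by sum(xs) + sum(xs[1::2]) (weight i%2+1 = 1 + [i odd]); objective: simpler.


-- ===== PORT A =====
-- the while-loop: consumes enum_xs from the front, adding (i%2+1)*x each step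
def dasLoopA : List (Int × Int) → Int → Int
  | [], total => total
  | (i, x) :: rest, total => dasLoopA rest (total + (PySem.Int.mod i 2 + 1) * x)

def doubleAndSum_3a (xs : List Int) : Int :=
  dasLoopA (PySem.List.enumerate xs) 0

-- ===== PORT B =====
-- exact port of the stride slice xs[1::2]: elements at indices 1, 3, 5, …
def pyOddStride : List Int → List Int
  | [] => []
  | [_] => []
  | _ :: y :: rest => y :: pyOddStride rest

def doubleAndSum_3a_alt (xs : List Int) : Int :=
  xs.sum + (pyOddStride xs).sum

-- ===== PRECONDITION & SPEC =====
def Spec_doubleAndSum_3a (xs : List Int) (out : Int) : Prop := out = doubleAndSum_3a_alt xs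
instance (xs : List Int) (out : Int) : Decidable (Spec_doubleAndSum_3a xs out) := by unfold Spec_doubleAndSum_3a; infer_instance

-- ===== CLAIM (what is proved, stated in full; the proofs are below) =====
def Claim_equal_doubleAndSum_3a : Prop := ∀ (xs : List Int), Dom_doubleAndSum_3a xs → Spec_doubleAndSum_3a xs (doubleAndSum_3a xs)

-- ===== LEMMAS AND PROOFS =====

-- elements of xs at even indices 0, 2, 4, …
def pyEvenStride : List Int → List Int
  | [] => []
  | x :: rest => x :: pyOddStride rest

theorem pyOddStride_cons (x : Int) (rest : List Int) :
    pyOddStride (x :: rest) = pyEvenStride rest := by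
  cases rest with
  | nil => rfl
  | cons y r => rfl

theorem dasLoopA_acc (l : List (Int × Int)) (t : Int) :
    dasLoopA l t = t + dasLoopA l 0 := by
  induction l generalizing t with
  | nil => simp [dasLoopA]
  | cons p rest ih =>
    obtain ⟨i, x⟩ := p
    simp only [dasLoopA]
    rw [ih, ih (0 + (PySem.Int.mod i 2 + 1) * x)]
    ring

theorem dasLoopA_enum (xs : List Int) (n : Nat) :
    dasLoopA (PySem.List.enumerate xs (n : Int)) 0 =
      xs.sum + (if (n : Int) % 2 = 0 then (pyOddStride xs).sum else (pyEvenStride xs).sum) := by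
  induction xs generalizing n with
  | nil => simp [PySem.List.enumerate_nil, dasLoopA, pyOddStride, pyEvenStride]
  | cons x rest ih =>
    rw [PySem.List.enumerate_cons, dasLoopA, dasLoopA_acc]
    have hcast : (n : Int) + 1 = ((n + 1 : Nat) : Int) := by push_cast; ring
    rw [hcast, ih (n + 1)]
    have hmod : PySem.Int.mod (n : Int) 2 = (n : Int) % 2 := by
      simp [PySem.Int.mod, Int.fmod_eq_emod]
    rw [hmod, pyOddStride_cons, pyEvenStride]
    push_cast
    by_cases h : (n : Int) % 2 = 0
    · have h1 : ((n : Int) + 1) % 2 = 1 := by omega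
      simp [h, h1, List.sum_cons]
      ring
    · have h1 : ((n : Int) + 1) % 2 = 0 := by omega
      simp [h, h1, List.sum_cons]
      have h2 : (n : Int) % 2 = 1 := by omega
      rw [h2]; ring

-- ===== VERDICT (by name: the statement is the Claim_ definition above) =====
theorem doubleAndSum_3a_spec : Claim_equal_doubleAndSum_3a := by
  intro xs _
  unfold Spec_doubleAndSum_3a doubleAndSum_3a doubleAndSum_3a_alt
  have h := dasLoopA_enum xs 0
  simpa using h
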